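-- pv_equiv track=rewrite | github.com/einarhorn/apartmenthunter | app.py | calculate_paging_index
-- ===== SOURCE A (Python) =====
-- def calculate_paging_index(num_pages):
--     """Calculate which of the five pagination links to show
--     e.g. if there are three pages of results, only show the first three links (Page 1, Page 2, Page 3)
--     e.g. if there are 10 pages of results, only show the first five links
--
--     Args:
--         num_pages (int): number of pages in query
--
--     Returns:
--         list of five booleans
--     """
--
--     show_paging_index = []
--     for i in range(1, 6):
--         if num_pages >= i:
--             show_paging_index.append(True)
--         else:
--             show_paging_index.append(False)
--     return show_paging_index
-- ===== SOURCE B (Python) =====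
-- def calculate_paging_index(num_pages):
--     n = max(0, min(num_pages, 5))
--     return [True] * n + [False] * (5 - n)
-- ===== Notes on version B (the rewrite author's own statement) =====
-- stated objective: simpler
-- what changed: Replaces the five-iteration compare-and-append loop with a closed-form clamped count n = max(0, min(num_pages, 5)) and builds [True]*n + [False]*(5-n) directly.
import Mathlib
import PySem

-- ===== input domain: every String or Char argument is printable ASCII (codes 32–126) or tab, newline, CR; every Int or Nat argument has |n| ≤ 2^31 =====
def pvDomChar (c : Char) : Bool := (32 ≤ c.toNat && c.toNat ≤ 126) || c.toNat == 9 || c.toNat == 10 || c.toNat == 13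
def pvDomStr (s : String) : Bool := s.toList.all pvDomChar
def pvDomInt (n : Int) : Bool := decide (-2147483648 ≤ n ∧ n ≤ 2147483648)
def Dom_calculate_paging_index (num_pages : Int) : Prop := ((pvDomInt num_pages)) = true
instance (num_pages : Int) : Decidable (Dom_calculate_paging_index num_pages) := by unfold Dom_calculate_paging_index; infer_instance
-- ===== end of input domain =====

-- B replaces the five-iteration compare-and-append loop with a clamped count and direct list construction (simpler).


-- ===== PORT A =====
-- for i in range(1, 6): append (num_pages >= i)
def calculate_paging_index (num_pages : Int) : List Bool :=
  (PySem.List.pyRange 1 6 1).foldl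
    (fun show_paging_index i =>
      if num_pages ≥ i then show_paging_index ++ [true] else show_paging_index ++ [false])
    []

-- ===== PORT B =====
-- n = max(0, min(num_pages, 5)); [True]*n + [False]*(5-n)
def calculate_paging_index_alt (num_pages : Int) : List Bool :=
  let n := max 0 (min num_pages 5)
  List.replicate n.toNat true ++ List.replicate (5 - n).toNat false

-- ===== PRECONDITION & SPEC =====
def Spec_calculate_paging_index (num_pages : Int) (out : List Bool) : Prop := out = calculate_paging_index_alt num_pages
instance (num_pages : Int) (out : List Bool) : Decidable (Spec_calculate_paging_index num_pages out) := by unfold Spec_calculate_paging_index; infer_instance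

-- ===== CLAIM (what is proved, stated in full; the proofs are below) =====
def Claim_equal_calculate_paging_index : Prop := ∀ (num_pages : Int), Dom_calculate_paging_index num_pages → Spec_calculate_paging_index num_pages (calculate_paging_index num_pages)

-- ===== LEMMAS AND PROOFS =====

theorem append_ite_bool (c : Prop) [Decidable c] (l : List Bool) :
    (if c then l ++ [true] else l ++ [false]) = l ++ [decide c] := by
  split_ifs <;> simp_all

theorem pagingA_eval (num_pages : Int) :
    calculate_paging_index num_pages =
      [decide (1 ≤ num_pages), decide (2 ≤ num_pages), decide (3 ≤ num_pages),
       decide (4 ≤ num_pages), decide (5 ≤ num_pages)] := by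
  have h : PySem.List.pyRange 1 6 1 = [1, 2, 3, 4, 5] := by decide
  simp [calculate_paging_index, h, ge_iff_le, append_ite_bool]

-- ===== VERDICT (by name: the statement is the Claim_ definition above) =====
theorem calculate_paging_index_spec : Claim_equal_calculate_paging_index := by
  intro n _
  unfold Spec_calculate_paging_index calculate_paging_index_alt
  rw [pagingA_eval]
  rcases Int.lt_or_le n 1 with h | h
  · have h0 : max 0 (min n 5) = 0 := by omega
    rw [h0]; simp <;> omega
  rcases Int.lt_or_le n 2 with h2 | h2
  · have h0 : max 0 (min n 5) = 1 := by omega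
    rw [h0]; simp; omega
  rcases Int.lt_or_le n 3 with h3 | h3
  · have h0 : max 0 (min n 5) = 2 := by omega
    rw [h0]; simp; omega
  rcases Int.lt_or_le n 4 with h4 | h4
  · have h0 : max 0 (min n 5) = 3 := by omega
    rw [h0]; simp; omega
  rcases Int.lt_or_le n 5 with h5 | h5
  · have h0 : max 0 (min n 5) = 4 := by omega
    rw [h0]; simp; omega
  · have h0 : max 0 (min n 5) = 5 := by omega
    rw [h0]; simp; omega
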